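-- pv_equiv track=rewrite | github.com/blacksegal/ascon_weak_key_analysis | weak_keys_small.py | count_keys_sWK_small
-- ===== SOURCE A (Python) =====
-- def combs(iterable, r):
--     pool = tuple(iterable)
--     n = len(pool)
--     if r > n:
--         return
--     indices = list(range(r))
--     yield list(pool[i] for i in indices)
--     while True:
--         for i in reversed(range(r)):
--             if indices[i] != i + n - r:
--                 break
--         else:
--             return
--         indices[i] += 1
--         for j in range(i + 1, r):
--             indices[j] = indices[j - 1] + 1
--         yield list(pool[i] for i in indices)
--
-- def count_keys_sWK_small(n, J, d):
--     II = list(combs([i for i in range(n)], d))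
--     l = '{0:0' + str(2 * n) + 'b}'
--     KEYS = []
--     for XX in II:
--         YY = list(set([i for i in range(n)]) - set(XX))
--         for i in range(1 << (2 * n)):
--             B = [int(z) for z in l.format(i)]
--             count = 0
--             for x in XX:
--                 if x in J:
--                     if (B[x] == 0) and (B[x + n]) == 1:
--                         count = count + 1
--                 else:
--                     if B[x] == 0 and B[x + n] == 0:
--                         count = count + 1
--
--             for y in YY:
--                 if y in J:
--                     count = count + 1
--                 else:
--                     if B[y] != B[y + n]:
--                         count = count + 1
--             if count == n:
--                 KEYS.append(i)
--
--     return KEYS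
-- ===== SOURCE B (Python) =====
-- def count_keys_sWK_small(n, J, d):
--     # Generates valid keys per combination directly (Cartesian product of the
--     # allowed bit-pairs per position) instead of testing all 2^(2n) keys.
--     def _combos(pool, r):
--         # iterative lexicographic combinations: extend all partial choices one slot at a time
--         if r <= 0:
--             return [[]]
--         if r > len(pool):
--             return []
--         partial = [(0, [])]
--         for k in range(r):
--             partial = [(j + 1, c + [pool[j]])
--                        for (s, c) in partial
--                        for j in range(s, len(pool) - (r - 1 - k))]
--         return [c for (_, c) in partial]
--
--     KEYS = []
--     for XX in _combos(list(range(n)), d):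
--         part = [0]
--         for p in range(n):
--             if p in XX:
--                 pairs = [(0, 1)] if p in J else [(0, 0)]
--             elif p in J:
--                 pairs = [(0, 0), (0, 1), (1, 0), (1, 1)]
--             else:
--                 pairs = [(0, 1), (1, 0)]
--             hi = 2 ** (2 * n - 1 - p)
--             lo = 2 ** (n - 1 - p)
--             part = [v + b1 * hi + b2 * lo for v in part for (b1, b2) in pairs]
--         KEYS.extend(sorted(part))
--     return KEYS
-- ===== Notes on version B (the rewrite author's own statement) =====
-- stated objective: faster
-- what changed: Instead of testing every one of the 2^(2n) candidate keys against the per-position constraints, B generates the valid keys for each combination directly as the Cartesian product of the allowed (bit, bit+n) pairs per position (sorted per block), and replaces the index-stepping combination generator by a structural recursion.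
import Mathlib
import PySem

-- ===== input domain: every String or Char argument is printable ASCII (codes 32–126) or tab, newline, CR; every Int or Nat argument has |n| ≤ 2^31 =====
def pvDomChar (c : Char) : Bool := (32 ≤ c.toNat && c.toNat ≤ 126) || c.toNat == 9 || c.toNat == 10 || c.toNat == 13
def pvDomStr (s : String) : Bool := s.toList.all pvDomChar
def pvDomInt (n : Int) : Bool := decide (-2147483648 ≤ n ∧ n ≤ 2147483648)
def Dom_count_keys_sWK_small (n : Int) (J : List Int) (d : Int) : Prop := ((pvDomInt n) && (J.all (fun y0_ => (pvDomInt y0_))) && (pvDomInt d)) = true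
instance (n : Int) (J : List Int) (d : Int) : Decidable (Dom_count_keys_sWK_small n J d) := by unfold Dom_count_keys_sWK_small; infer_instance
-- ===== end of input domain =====

-- B replaces A's scan of all 2^(2n) candidate keys per combination by directly generating
-- the valid keys as a Cartesian product of the allowed bit-pairs per position (objective: faster).

-- ===== PORT A =====

-- pool[i] for i in indices (indices are always in range here; default never used)
def combsYield (pool : List Int) (idx : List Int) : List Int :=
  idx.map (fun i => (PySem.List.pyGet? pool i).getD 0)

-- 'for i in reversed(range(r)): if indices[i] != i + n - r: break / else: return' —
-- scans indices (length r) from the right with their positions (pos tracks the position of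
-- the current head); returns the break position: the LAST position whose test fails.
def combsFindL (nn r : Int) : Nat → List Int → Option Nat
  | _, [] => none
  | pos, v :: rest =>
    match combsFindL nn r (pos + 1) rest with
    | some j => some j
    | none => if v ≠ (pos : Int) + nn - r then some pos else none

def combsFind (nn r : Int) (idx : List Int) : Option Nat := combsFindL nn r 0 idx

-- 'for j in range(i+1, r): indices[j] = indices[j-1] + 1' — each later entry = previous + 1
def combsFill (v : Int) : List Int → List Int
  | [] => []
  | _ :: t => (v + 1) :: combsFill (v + 1) t

-- 'indices[i] += 1' followed by the chain fill above
def combsUpdate : List Int → Nat → List Int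
  | [], _ => []
  | x :: t, 0 => (x + 1) :: combsFill (x + 1) t
  | x :: t, k + 1 => x :: combsUpdate t k

-- the 'while True' loop of combs; fuel bounds the number of iterations and is never
-- exhausted (the equivalence proof shows (len pool + 1)^r iterations always suffice)
def combsLoop (pool : List Int) (nn r : Int) : Nat → List Int → List (List Int)
  | 0, _ => []
  | fuel + 1, idx =>
    match combsFind nn r idx with
    | none => []
    | some i =>
      let idx' := combsUpdate idx i
      combsYield pool idx' :: combsLoop pool nn r fuel idx'

-- list(combs(pool, r))
def combsA (pool : List Int) (r : Int) : List (List Int) :=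
  let nn : Int := pool.length
  if r > nn then []
  else
    let idx := PySem.List.pyRange 0 r 1
    combsYield pool idx :: combsLoop pool nn r ((pool.length + 1) ^ r.toNat) idx

-- hand port of format(i, 'b') for i ≥ 0 (binary digits, msb first), as the digit ints
def natBits : Nat → List Int
  | 0 => [0]
  | 1 => [1]
  | m + 2 => natBits ((m + 2) / 2) ++ [(((m + 2) % 2 : Nat) : Int)]

-- hand port of [int(z) for z in ('{0:0' + str(w) + 'b}').format(i)] — exact for i ≥ 0
-- (i here always comes from range(1 << 2n), so i ≥ 0)
def formatBits (w : Int) (i : Int) : List Int :=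
  let ds := natBits i.toNat
  List.replicate (w.toNat - ds.length) 0 ++ ds

-- B[x]; every access in A is in range (0 ≤ x < len B), so the default is never used
def bGet (B : List Int) (x : Int) : Int := (PySem.List.pyGet? B x).getD 0

-- the per-key test of A's inner loop: build the digit list B and count satisfied positions
def keyTest (n : Int) (J XX YY : List Int) (i : Int) : Bool :=
  let B := formatBits (2 * n) i
  let count : Int :=
    XX.foldl (fun count x =>
      if x ∈ J then
        if bGet B x = 0 ∧ bGet B (x + n) = 1 then count + 1 else count
      else
        if bGet B x = 0 ∧ bGet B (x + n) = 0 then count + 1 else count) 0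
  let count :=
    YY.foldl (fun count y =>
      if y ∈ J then count + 1
      else if bGet B y ≠ bGet B (y + n) then count + 1 else count) count
  count = n

def count_keys_sWK_small (n : Int) (J : List Int) (d : Int) : List Int :=
  let II := combsA (PySem.List.pyRange 0 n 1) d
  II.foldl (fun KEYS XX =>
    -- YY = list(set(range(n)) - set(XX)); CPython's set iteration order is immaterial:
    -- YY is only folded over with a commutative (+) accumulation inside keyTest
    let YY := (PySem.List.pyRange 0 n 1).filter (fun y => ¬ y ∈ XX)
    -- range(1 << (2*n)); only evaluated when II ≠ [], hence n ≥ 0 under Pre_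
    (PySem.List.pyRange 0 ((2:Int) ^ (2 * n).toNat) 1).foldl (fun KEYS i =>
      if keyTest n J XX YY i then KEYS ++ [i] else KEYS) KEYS) []

-- ===== PORT B =====

def combosRec (pool : List Int) (r : Int) : List (List Int) :=
  if r ≤ 0 then [[]]
  else if (pool.length : Int) < r then []
  else
    match pool with
    | [] => []  -- unreachable: 0 < r ≤ len pool
    | x :: rest => ((combosRec rest (r - 1)).map (fun t => x :: t)) ++ combosRec rest r
termination_by structural pool

-- the valid-key list for one combination XX: Cartesian product of allowed bit-pairs
def partB (n : Int) (J XX : List Int) : List Int :=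
  (PySem.List.pyRange 0 n 1).foldl (fun part p =>
    let pairs : List (Int × Int) :=
      if p ∈ XX then (if p ∈ J then [(0, 1)] else [(0, 0)])
      else if p ∈ J then [(0, 0), (0, 1), (1, 0), (1, 1)]
      else [(0, 1), (1, 0)]
    -- 2 ** (2*n - 1 - p) and 2 ** (n - 1 - p); exponents are ≥ 0 for p in range(n)
    let hi : Int := 2 ^ (2 * n - 1 - p).toNat
    let lo : Int := 2 ^ (n - 1 - p).toNat
    part.flatMap (fun v => pairs.map (fun bp => v + bp.1 * hi + bp.2 * lo))) [0]

def count_keys_sWK_small_alt (n : Int) (J : List Int) (d : Int) : List Int :=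
  (combosRec (PySem.List.pyRange 0 n 1) d).foldl (fun KEYS XX =>
    KEYS ++ PySem.List.sorted (partB n J XX) (fun v => v) false) []

-- ===== PRECONDITION & SPEC =====

-- Pre_ excludes exactly the inputs where A raises: n < 0 with d ≤ 0 (negative shift count)
def Pre_count_keys_sWK_small (n : Int) (J : List Int) (d : Int) : Prop := 0 ≤ n ∨ 0 < d
instance (n : Int) (J : List Int) (d : Int) : Decidable (Pre_count_keys_sWK_small n J d) := by
  unfold Pre_count_keys_sWK_small; infer_instance

def pvWitness_count_keys_sWK_small : Int × List Int × Int := (2, [0], 1)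

def Spec_count_keys_sWK_small (n : Int) (J : List Int) (d : Int) (out : List Int) : Prop := out = count_keys_sWK_small_alt n J d
instance (n : Int) (J : List Int) (d : Int) (out : List Int) : Decidable (Spec_count_keys_sWK_small n J d out) := by unfold Spec_count_keys_sWK_small; infer_instance

-- ===== CLAIM (what is proved, stated in full; the proofs are below) =====
def Claim_equal_count_keys_sWK_small : Prop := ∀ (n : Int) (J : List Int) (d : Int), Dom_count_keys_sWK_small n J d → Pre_count_keys_sWK_small n J d → Spec_count_keys_sWK_small n J d (count_keys_sWK_small n J d)

-- ===== LEMMAS AND PROOFS =====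

-- ===== Section 1: combinations =====

def sfx (nn : Int) : Nat → Int → List (List Int)
  | 0, _ => [[]]
  | r + 1, lo => (PySem.List.pyRange lo nn 1).flatMap (fun a => (sfx nn r (a + 1)).map (fun t => a :: t))

def minC (lo : Int) : Nat → List Int
  | 0 => []
  | r + 1 => lo :: minC (lo + 1) r

def lexFrom (nn : Int) : List Int → List (List Int)
  | [] => [[]]
  | a :: t => ((lexFrom nn t).map (fun t' => a :: t')) ++ sfx nn (t.length + 1) (a + 1)

def ValidFrom (nn : Int) : Int → List Int → Prop
  | _, [] => True
  | lo, a :: t => lo ≤ a ∧ a + (t.length : Int) < nn ∧ ValidFrom nn (a + 1) t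

def specNext (nn : Int) : List Int → Option (List Int)
  | [] => none
  | a :: t =>
    match specNext nn t with
    | some t' => some (a :: t')
    | none => if a + 1 + (t.length : Int) < nn then some (minC (a + 1) (t.length + 1)) else none

lemma sfx_nil (nn : Int) (r : Nat) : ∀ lo : Int, nn - lo < r → 0 < r → sfx nn r lo = [] := by
  induction r with
  | zero => intro _ _ h; omega
  | succ r ih =>
    intro lo h _
    by_cases hr : r = 0
    · subst hr
      unfold sfx
      rw [PySem.List.pyRange_one_eq_nil (by omega)]
      rfl
    · unfold sfx
      rw [List.flatMap_eq_nil_iff]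
      intro a ha
      rw [PySem.List.mem_pyRange_one] at ha
      rw [ih (a + 1) (by omega) (by omega)]
      rfl

lemma sfx_cons (nn : Int) (r : Nat) (lo : Int) (h : lo < nn) :
    sfx nn (r + 1) lo = ((sfx nn r (lo + 1)).map (fun t => lo :: t)) ++ sfx nn (r + 1) (lo + 1) := by
  conv_lhs => unfold sfx
  conv_rhs => rw [show sfx nn (r+1) (lo+1) = (PySem.List.pyRange (lo+1) nn 1).flatMap (fun a => (sfx nn r (a + 1)).map (fun t => a :: t)) from rfl]
  rw [PySem.List.pyRange_one_cons h, List.flatMap_cons]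

lemma length_minC (lo : Int) (r : Nat) : (minC lo r).length = r := by
  induction r generalizing lo with
  | zero => rfl
  | succ r ih => simp [minC, ih]

lemma valid_minC (nn : Int) (r : Nat) : ∀ lo : Int, lo + (r : Int) ≤ nn → ValidFrom nn lo (minC lo r) := by
  induction r with
  | zero => intro lo _; trivial
  | succ r ih =>
    intro lo h
    refine ⟨le_refl _, ?_, ih (lo + 1) (by omega)⟩
    rw [length_minC]; omega

lemma sfx_eq_lexFrom_minC (nn : Int) (r : Nat) : ∀ lo : Int, lo + (r : Int) ≤ nn →
    sfx nn r lo = lexFrom nn (minC lo r) := by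
  induction r with
  | zero => intro lo _; rfl
  | succ r ih =>
    intro lo h
    rw [sfx_cons nn r lo (by omega)]
    show _ = lexFrom nn (lo :: minC (lo + 1) r)
    rw [lexFrom, length_minC, ih (lo + 1) (by omega)]

lemma combosRec_eq_sfx (nn : Int) : ∀ (k : Nat) (lo r : Int), (nn - lo).toNat = k →
    combosRec (PySem.List.pyRange lo nn 1) r = sfx nn r.toNat lo := by
  intro k
  induction k using Nat.strong_induction_on with
  | _ k ih =>
    intro lo r hk
    by_cases hr : r ≤ 0
    · conv_lhs => rw [combosRec.eq_def]
      simp only [if_pos hr]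
      rw [show r.toNat = 0 by omega]; rfl
    · by_cases hg : ((PySem.List.pyRange lo nn 1).length : Int) < r
      · conv_lhs => rw [combosRec.eq_def]
        simp only [if_neg hr, if_pos hg]
        rw [PySem.List.length_pyRange_one] at hg
        rw [sfx_nil nn r.toNat lo (by omega) (by omega)]
      · have hlo : lo < nn := by
          rw [PySem.List.length_pyRange_one] at hg
          omega
        rw [PySem.List.pyRange_one_cons hlo]
        conv_lhs => rw [combosRec.eq_def]
        have hg' : ¬ (((lo :: PySem.List.pyRange (lo + 1) nn 1).length : Int) < r) := by
          rw [List.length_cons, PySem.List.length_pyRange_one]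
          rw [PySem.List.length_pyRange_one] at hg
          push_cast at hg ⊢
          omega
        simp only [if_neg hr, if_neg hg']
        rw [ih (nn - (lo+1)).toNat (by omega) (lo+1) (r-1) rfl,
            ih (nn - (lo+1)).toNat (by omega) (lo+1) r rfl]
        obtain ⟨m, hm⟩ : ∃ m, r.toNat = m + 1 := ⟨(r-1).toNat, by omega⟩
        rw [hm, sfx_cons nn m lo hlo, show (r-1).toNat = m by omega]

lemma yield_valid (nn : Int) (c : List Int) : ∀ lo, 0 ≤ lo → ValidFrom nn lo c →
    combsYield (PySem.List.pyRange 0 nn 1) c = c := by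
  induction c with
  | nil => intro _ _ _; rfl
  | cons a t ih =>
    intro lo hlo ⟨h1, h2, h3⟩
    have ha : 0 ≤ a := by omega
    have ha2 : a < nn := by have := t.length; omega
    show _ :: _ = _
    rw [combsYield] at *
    congr 1
    · show (PySem.List.pyGet? (PySem.List.pyRange 0 nn 1) a).getD 0 = a
      rw [PySem.List.pyGet?_of_nonneg _ ha]
      rw [List.getElem?_eq_getElem (by rw [PySem.List.length_pyRange_one]; omega)]
      rw [PySem.List.getElem_pyRange_one]
      simp; omega
    · exact ih (a+1) (by omega) h3

lemma combsFill_eq_minC (t : List Int) : ∀ v : Int, combsFill v t = minC (v + 1) t.length := by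
  induction t with
  | nil => intro v; rfl
  | cons x t ih => intro v; show (v + 1) :: combsFill (v + 1) t = _; rw [ih (v + 1)]; rfl

lemma combsFindL_shift (nn : Int) (r : Int) (t : List Int) : ∀ p : Nat,
    combsFindL nn (r + 1) (p + 1) t = Option.map (· + 1) (combsFindL nn r p t) := by
  induction t with
  | nil => intro p; rfl
  | cons v rest ih =>
    intro p
    rw [combsFindL, combsFindL, ih (p + 1)]
    cases combsFindL nn r (p + 1) rest with
    | some j => rfl
    | none =>
      show (if v ≠ ((p : Int) + 1) + nn - (r + 1) then some (p + 1) else none) =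
        Option.map (· + 1) (if v ≠ (p : Int) + nn - r then some p else none)
      by_cases h : v ≠ (p : Int) + nn - r
      · rw [if_pos h, if_pos (by push_cast; omega)]; rfl
      · rw [if_neg h, if_neg (by push_cast; omega)]; rfl

lemma combsFind_cons (nn a : Int) (t : List Int) :
    combsFind nn ((t.length : Int) + 1) (a :: t) =
      match combsFind nn (t.length : Int) t with
      | some j => some (j + 1)
      | none => if a ≠ nn - ((t.length : Int) + 1) then some 0 else none := by
  unfold combsFind
  rw [combsFindL, show (0 + 1 : Nat) = 0 + 1 from rfl, combsFindL_shift]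
  cases combsFindL nn (t.length : Int) 0 t with
  | some j => rfl
  | none =>
    show (if a ≠ ((0 : Nat) : Int) + nn - ((t.length : Int) + 1) then some 0 else none) = _
    by_cases h : a ≠ nn - ((t.length : Int) + 1)
    · rw [if_pos (by push_cast; omega), if_pos h]
    · rw [if_neg (by push_cast; omega), if_neg h]

lemma find_spec (nn : Int) (c : List Int) : ∀ lo : Int, ValidFrom nn lo c →
    match combsFind nn (c.length : Int) c with
    | none => specNext nn c = none
    | some i => specNext nn c = some (combsUpdate c i) := by
  induction c with
  | nil => intro lo _; rfl
  | cons a t ih =>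
    intro lo ⟨h1, h2, h3⟩
    have hc : ((a :: t).length : Int) = (t.length : Int) + 1 := by push_cast; simp
    rw [hc, combsFind_cons]
    have := ih (a + 1) h3
    cases hft : combsFind nn (t.length : Int) t with
    | some j =>
      rw [hft] at this
      show specNext nn (a :: t) = some (combsUpdate (a :: t) (j + 1))
      rw [specNext, this]
      rfl
    | none =>
      rw [hft] at this
      by_cases hcond : a ≠ nn - ((t.length : Int) + 1)
      · rw [if_pos hcond]
        show specNext nn (a :: t) = some (combsUpdate (a :: t) 0)
        rw [specNext, this]
        rw [if_pos (by omega)]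
        show _ = some ((a + 1) :: combsFill (a + 1) t)
        rw [combsFill_eq_minC]
        rfl
      · rw [if_neg hcond]
        show specNext nn (a :: t) = none
        rw [specNext, this]
        rw [if_neg (by omega)]

lemma specNext_none_lex (nn : Int) (c : List Int) : ∀ lo : Int, ValidFrom nn lo c →
    specNext nn c = none → lexFrom nn c = [c] := by
  induction c with
  | nil => intro _ _ _; rfl
  | cons a t ih =>
    intro lo ⟨h1, h2, h3⟩ hn
    rw [specNext] at hn
    cases hst : specNext nn t with
    | some t' => rw [hst] at hn; exact absurd hn (by simp)
    | none =>
      rw [hst] at hn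
      have hcond : ¬ (a + 1 + (t.length : Int) < nn) := by
        by_contra hc
        rw [if_pos hc] at hn; exact absurd hn (by simp)
      rw [lexFrom, ih (a + 1) h3 hst]
      rw [sfx_nil nn (t.length + 1) (a + 1) (by omega) (by omega)]
      rfl

lemma specNext_some_lex (nn : Int) (c : List Int) : ∀ (lo : Int) (c' : List Int), ValidFrom nn lo c →
    specNext nn c = some c' →
    ValidFrom nn lo c' ∧ c'.length = c.length ∧ lexFrom nn c = c :: lexFrom nn c' := by
  induction c with
  | nil => intro _ _ _ h; exact absurd h (by simp [specNext])
  | cons a t ih =>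
    intro lo c' ⟨h1, h2, h3⟩ hs
    rw [specNext] at hs
    cases hst : specNext nn t with
    | some t' =>
      rw [hst] at hs
      obtain ⟨hv', hl', hx'⟩ := ih (a + 1) t' h3 hst
      have hc' : c' = a :: t' := by simpa using hs.symm
      subst hc'
      refine ⟨⟨h1, by rw [hl']; exact h2, hv'⟩, by simp [hl'], ?_⟩
      rw [lexFrom, lexFrom, hx', hl']
      rfl
    | none =>
      rw [hst] at hs
      by_cases hcond : a + 1 + (t.length : Int) < nn
      · rw [if_pos hcond] at hs
        have hc' : c' = minC (a + 1) (t.length + 1) := by simpa using hs.symm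
        subst hc'
        refine ⟨?_, by simp [length_minC], ?_⟩
        · have := valid_minC nn (t.length + 1) (a + 1) (by push_cast; omega)
          match t.length, this with
          | r, ⟨hA, hB, hC⟩ => exact ⟨by omega, hB, hC⟩
        · rw [lexFrom, specNext_none_lex nn t (a + 1) h3 hst,
              sfx_eq_lexFrom_minC nn (t.length + 1) (a + 1) (by push_cast; omega)]
          rfl
      · rw [if_neg hcond] at hs; exact absurd hs (by simp)

lemma lexFrom_head (nn : Int) (c : List Int) : ∀ lo : Int, ValidFrom nn lo c →
    ∃ rest, lexFrom nn c = c :: rest := by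
  induction c with
  | nil => intro _ _; exact ⟨[], rfl⟩
  | cons a t ih =>
    intro lo ⟨h1, h2, h3⟩
    obtain ⟨rest, hr⟩ := ih (a + 1) h3
    rw [lexFrom, hr]
    exact ⟨_, rfl⟩

lemma loop_lex (nn : Int) : ∀ (fuel : Nat) (c : List Int) (lo r : Int), r = (c.length : Int) →
    0 ≤ lo → ValidFrom nn lo c →
    (lexFrom nn c).length ≤ fuel + 1 →
    c :: combsLoop (PySem.List.pyRange 0 nn 1) nn r fuel c = lexFrom nn c := by
  intro fuel
  induction fuel with
  | zero =>
    intro c lo r hr hlo hv hlen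
    obtain ⟨rest, hr⟩ := lexFrom_head nn c lo hv
    rw [combsLoop, hr]
    rw [hr] at hlen
    simp only [List.length_cons] at hlen
    have : rest = [] := by
      cases rest with
      | nil => rfl
      | cons _ _ => simp at hlen
    rw [this]
  | succ fuel ih =>
    intro c lo r hr hlo hv hlen
    subst hr
    rw [combsLoop]
    have hfs := find_spec nn c lo hv
    cases hf : combsFind nn (c.length : Int) c with
    | none =>
      rw [hf] at hfs
      rw [specNext_none_lex nn c lo hv hfs]
    | some i =>
      rw [hf] at hfs
      obtain ⟨hv', hl', hx'⟩ := specNext_some_lex nn c lo (combsUpdate c i) hv hfs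
      rw [hx']
      simp only
      rw [yield_valid nn (combsUpdate c i) lo hlo hv']
      congr 1
      exact ih (combsUpdate c i) lo (c.length : Int) (by rw [hl']) hlo hv'
        (by rw [hx'] at hlen; simp at hlen; omega)

lemma length_sfx_le (nn : Int) (r : Nat) : ∀ lo : Int, (sfx nn r lo).length ≤ (nn - lo).toNat ^ r := by
  induction r with
  | zero => intro lo; simp [sfx]
  | succ r ih =>
    intro lo
    rw [sfx, List.length_flatMap]
    have hb : ∀ x ∈ (PySem.List.pyRange lo nn 1).map
        (fun a => ((sfx nn r (a + 1)).map (fun t => a :: t)).length), x ≤ (nn - lo).toNat ^ r := by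
      intro x hx
      rw [List.mem_map] at hx
      obtain ⟨a, ha, hax⟩ := hx
      rw [PySem.List.mem_pyRange_one] at ha
      rw [← hax, List.length_map]
      calc (sfx nn r (a + 1)).length ≤ (nn - (a + 1)).toNat ^ r := ih (a + 1)
        _ ≤ (nn - lo).toNat ^ r := Nat.pow_le_pow_left (by omega) r
    calc ((PySem.List.pyRange lo nn 1).map _).sum
        ≤ ((PySem.List.pyRange lo nn 1).map (fun a => ((sfx nn r (a + 1)).map (fun t => a :: t)).length)).length • ((nn - lo).toNat ^ r) := List.sum_le_card_nsmul _ _ hb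
      _ ≤ (nn - lo).toNat ^ (r + 1) := by
          rw [List.length_map, PySem.List.length_pyRange_one, smul_eq_mul, pow_succ]
          rw [Nat.mul_comm]

lemma length_lexFrom_le (nn : Int) (c : List Int) : ∀ lo : Int, 0 ≤ lo → ValidFrom nn lo c →
    (lexFrom nn c).length ≤ (nn.toNat + 1) ^ c.length := by
  induction c with
  | nil => intro _ _ _; simp [lexFrom]
  | cons a t ih =>
    intro lo hlo ⟨h1, h2, h3⟩
    rw [lexFrom, List.length_append, List.length_map]
    have hA := ih (a + 1) (by omega) h3
    have hB := length_sfx_le nn (t.length + 1) (a + 1)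
    have hle : (nn - (a + 1)).toNat ≤ nn.toNat := by omega
    have hB' : (sfx nn (t.length + 1) (a + 1)).length ≤ nn.toNat ^ (t.length + 1) :=
      le_trans hB (Nat.pow_le_pow_left hle _)
    have : (nn.toNat + 1) ^ t.length + nn.toNat ^ (t.length + 1) ≤ (nn.toNat + 1) ^ (t.length + 1) := by
      rw [pow_succ, pow_succ]
      have h4 : nn.toNat ^ t.length ≤ (nn.toNat + 1) ^ t.length := Nat.pow_le_pow_left (by omega) _
      nlinarith [h4]
    simp only [List.length_cons]
    omega

lemma pyRange_eq_minC (r : Nat) : ∀ lo : Int, PySem.List.pyRange lo (lo + (r : Int)) 1 = minC lo r := by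
  induction r with
  | zero => intro lo; rw [minC]; exact PySem.List.pyRange_one_eq_nil (by omega)
  | succ r ih =>
    intro lo
    rw [PySem.List.pyRange_one_cons (by omega), minC]
    congr 1
    rw [show lo + ((r + 1 : Nat) : Int) = (lo + 1) + (r : Int) by push_cast; ring]
    exact ih (lo + 1)

lemma mem_sfx (nn : Int) (r : Nat) : ∀ (lo : Int) (XX : List Int), XX ∈ sfx nn r lo →
    ValidFrom nn lo XX ∧ XX.length = r ∧ (lo + (r : Int) ≤ nn ∨ r = 0) := by
  induction r with
  | zero =>
    intro lo XX h
    rw [sfx] at h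
    simp at h
    subst h
    exact ⟨trivial, rfl, Or.inr rfl⟩
  | succ r ih =>
    intro lo XX h
    rw [sfx, List.mem_flatMap] at h
    obtain ⟨a, ha, hm⟩ := h
    rw [PySem.List.mem_pyRange_one] at ha
    rw [List.mem_map] at hm
    obtain ⟨t, ht, hxt⟩ := hm
    obtain ⟨hvt, hlt, hbt⟩ := ih (a + 1) t ht
    subst hxt
    have hbound : a + (t.length : Int) < nn := by
      rcases hbt with hb | hb
      · omega
      · rw [hb] at hlt; rw [hlt]; simpa using ha.2
    exact ⟨⟨ha.1, hbound, hvt⟩, by simp [hlt], Or.inl (by push_cast; omega)⟩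

lemma combsA_eq (n d : Int) (h : 0 ≤ n ∨ 0 < d) :
    combsA (PySem.List.pyRange 0 n 1) d = combosRec (PySem.List.pyRange 0 n 1) d := by
  by_cases hn : n < 0
  · have hd : 0 < d := by omega
    rw [PySem.List.pyRange_one_eq_nil (by omega)]
    rw [combsA]
    simp only [List.length_nil]
    rw [if_pos (by omega)]
    conv_rhs => rw [combosRec.eq_def]
    rw [if_neg (by omega), if_pos (by simpa using hd)]
  · have hn' : 0 ≤ n := by omega
    have hlen : ((PySem.List.pyRange 0 n 1).length : Int) = n := by
      rw [PySem.List.length_pyRange_one]; omega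
    rw [combsA]
    simp only [hlen]
    by_cases hdn : d > n
    · rw [if_pos hdn]
      rw [combosRec_eq_sfx n (n - 0).toNat 0 d rfl]
      rw [sfx_nil n d.toNat 0 (by omega) (by omega)]
    · rw [if_neg hdn]
      by_cases hd0 : d ≤ 0
      · -- indices = [], find returns none immediately
        rw [PySem.List.pyRange_one_eq_nil (a := 0) (b := d) (by omega)]
        rw [combosRec_eq_sfx n (n - 0).toNat 0 d rfl, show d.toNat = 0 by omega]
        rw [pow_zero]
        rfl
      · -- 0 < d ≤ n
        have hmin : PySem.List.pyRange 0 d 1 = minC 0 d.toNat := by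
          have h0 := pyRange_eq_minC d.toNat 0
          rw [show (0 : Int) + (d.toNat : Int) = d by omega] at h0
          exact h0
        have hval : ValidFrom n 0 (minC 0 d.toNat) := valid_minC n d.toNat 0 (by omega)
        have hlc : ((minC 0 d.toNat).length : Int) = d := by rw [length_minC]; omega
        rw [hmin, yield_valid n (minC 0 d.toNat) 0 le_rfl hval]
        rw [loop_lex n _ (minC 0 d.toNat) 0 d hlc.symm le_rfl hval ?hfuel]
        · rw [← sfx_eq_lexFrom_minC n d.toNat 0 (by omega)]
          rw [combosRec_eq_sfx n (n - 0).toNat 0 d rfl]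
        case hfuel =>
          have hb := length_lexFrom_le n (minC 0 d.toNat) 0 le_rfl hval
          rw [length_minC] at hb
          refine le_trans hb ?_
          rw [PySem.List.length_pyRange_one]
          have h1 : (n - 0).toNat = n.toNat := by omega
          rw [h1]
          exact le_trans (Nat.pow_le_pow_left (by omega) _) (Nat.le_succ _)

-- ===== Section 2: per-combination key lists =====

def bitN (v s : Nat) : Nat := v / 2 ^ s % 2

def bitsList : Nat → Nat → List Int
  | 0, _ => []
  | w + 1, i => bitsList w (i / 2) ++ [((i % 2 : Nat) : Int)]

lemma bitsList_zero (w : Nat) : bitsList w 0 = List.replicate w 0 := by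
  induction w with
  | zero => rfl
  | succ w ih =>
    rw [bitsList, Nat.zero_div, ih, List.replicate_succ']
    norm_num

lemma length_bitsList (w : Nat) : ∀ i, (bitsList w i).length = w := by
  induction w with
  | zero => intro i; rfl
  | succ w ih => intro i; rw [bitsList, List.length_append, ih]; rfl

lemma natBits_len : ∀ (i k : Nat), i < 2 ^ k → 0 < k → (natBits i).length ≤ k := by
  intro i
  induction i using Nat.strong_induction_on with
  | _ i ih =>
    intro k hik hk
    match i with
    | 0 => rw [natBits]; simpa using hk
    | 1 => rw [natBits]; simpa using hk
    | m + 2 =>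
      have hk2 : 2 ≤ k := by
        by_contra hc
        have hk1 : k = 1 := by omega
        rw [hk1] at hik
        norm_num at hik
        omega
      rw [natBits, List.length_append]
      have := ih ((m + 2) / 2) (by omega) (k - 1) (by
        have h2 : 2 ^ k = 2 * 2 ^ (k - 1) := by
          rw [← pow_succ']
          congr 1
          omega
        omega) (by omega)
      simp only [List.length_cons, List.length_nil]
      omega

lemma fmt_eq : ∀ (w i : Nat), 0 < w → i < 2 ^ w →
    formatBits ((w : Nat) : Int) ((i : Nat) : Int) = bitsList w i := by
  intro w
  induction w with
  | zero => intro _ h; omega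
  | succ w ih =>
    intro i _ hi
    by_cases hw : w = 0
    · subst hw
      match i, hi with
      | 0, _ => norm_num [formatBits, natBits, bitsList]
      | 1, _ => norm_num [formatBits, natBits, bitsList]
    · by_cases hi2 : i ≤ 1
      · -- natBits i = [i], pad with w zeros
        rw [bitsList, Nat.div_eq_of_lt (by omega), bitsList_zero]
        unfold formatBits
        match i, hi2 with
        | 0, _ =>
          show List.replicate ((w+1 : Int).toNat - (natBits 0).length) 0 ++ natBits 0 = _
          rw [natBits]
          simp
        | 1, _ =>
          show List.replicate ((w+1 : Int).toNat - (natBits 1).length) 0 ++ natBits 1 = _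
          rw [natBits]
          simp
      · -- i ≥ 2
        obtain ⟨m, rfl⟩ : ∃ m, i = m + 2 := ⟨i - 2, by omega⟩
        have hlen : (natBits ((m + 2) / 2)).length ≤ w := by
          apply natBits_len ((m + 2) / 2) w
          · have h2 : 2 ^ (w + 1) = 2 * 2 ^ w := by rw [← pow_succ']
            omega
          · omega
        have hstep : formatBits ((w + 1 : Nat) : Int) ((m + 2 : Nat) : Int)
            = formatBits ((w : Nat) : Int) (((m + 2) / 2 : Nat) : Int) ++ [(((m + 2) % 2 : Nat) : Int)] := by
          unfold formatBits
          show List.replicate (((w:Int) + 1).toNat - (natBits ((m+2:Nat):Int).toNat).length) 0 ++ natBits ((m+2:Nat):Int).toNat = _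
          rw [show ((m+2:Nat):Int).toNat = m + 2 by omega]
          rw [natBits]
          rw [show (((m+2)/2 : Nat) : Int).toNat = (m+2)/2 by omega]
          rw [← List.append_assoc]
          simp only [List.length_append, List.length_cons, List.length_nil]
          congr 3
          omega
        rw [hstep, bitsList, ih ((m + 2) / 2) (by omega) (by
          have h2 : 2 ^ (w + 1) = 2 * 2 ^ w := by rw [← pow_succ']
          omega)]

lemma bitsList_getElem? (w : Nat) : ∀ (i x : Nat), x < w →
    (bitsList w i)[x]? = some ((bitN i (w - 1 - x) : Nat) : Int) := by
  induction w with
  | zero => intro _ _ h; omega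
  | succ w ih =>
    intro i x hx
    rw [bitsList]
    by_cases hxw : x < w
    · rw [List.getElem?_append_left (by rw [length_bitsList]; omega)]
      rw [ih (i / 2) x hxw]
      unfold bitN
      rw [Nat.div_div_eq_div_mul, ← pow_succ']
      have hexp : w - 1 - x + 1 = w + 1 - 1 - x := by omega
      rw [hexp]
    · have hxe : x = w := by omega
      subst hxe
      rw [List.getElem?_append_right (by rw [length_bitsList])]
      rw [length_bitsList]
      simp only [Nat.sub_self]
      unfold bitN
      rw [show x + 1 - 1 - x = 0 by omega, pow_zero, Nat.div_one]
      rfl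

lemma bGet_bits (w i x : Nat) (hx : x < w) :
    bGet (bitsList w i) ((x : Nat) : Int) = ((bitN i (w - 1 - x) : Nat) : Int) := by
  unfold bGet
  rw [PySem.List.pyGet?_natCast, bitsList_getElem? w i x hx]
  rfl

def pairOKb (J XX : List Int) (p : Int) (b1 b2 : Nat) : Bool :=
  if p ∈ XX then (if p ∈ J then b1 == 0 && b2 == 1 else b1 == 0 && b2 == 0)
  else (if p ∈ J then true else b1 != b2)

def pairsN (J XX : List Int) (p : Int) : List (Nat × Nat) :=
  if p ∈ XX then (if p ∈ J then [(0, 1)] else [(0, 0)])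
  else if p ∈ J then [(0, 0), (0, 1), (1, 0), (1, 1)] else [(0, 1), (1, 0)]

def prs (J XX : List Int) : Nat → List (Nat × Nat)
  | 0 => [(0, 0)]
  | k + 1 => (prs J XX k).flatMap
      (fun ab => (pairsN J XX (k : Int)).map (fun b => (2 * ab.1 + b.1, 2 * ab.2 + b.2)))

lemma mem_pairsN (J XX : List Int) (p : Int) (b : Nat × Nat) :
    b ∈ pairsN J XX p ↔ (b.1 < 2 ∧ b.2 < 2 ∧ pairOKb J XX p b.1 b.2 = true) := by
  rcases b with ⟨b1, b2⟩
  unfold pairsN pairOKb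
  split_ifs <;> simp [Prod.ext_iff] <;> omega

lemma nodup_pairsN (J XX : List Int) (p : Int) : (pairsN J XX p).Nodup := by
  unfold pairsN
  split_ifs <;> decide

lemma bitN_double (a b1 s : Nat) (h : b1 < 2) : bitN (2 * a + b1) (s + 1) = bitN a s := by
  unfold bitN
  rw [pow_succ', ← Nat.div_div_eq_div_mul, show (2 * a + b1) / 2 = a from by omega]

lemma bitN_zero' (v : Nat) : bitN v 0 = v % 2 := by
  unfold bitN
  rw [pow_zero, Nat.div_one]

lemma mem_prs (J XX : List Int) : ∀ (k : Nat) (ab : Nat × Nat),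
    ab ∈ prs J XX k ↔ (ab.1 < 2 ^ k ∧ ab.2 < 2 ^ k ∧
      ∀ j : Nat, j < k → pairOKb J XX (j : Int) (bitN ab.1 (k - 1 - j)) (bitN ab.2 (k - 1 - j)) = true) := by
  intro k
  induction k with
  | zero =>
    intro ⟨a, b⟩
    simp [prs, Prod.ext_iff]
  | succ k ih =>
    intro ⟨a, b⟩
    rw [prs, List.mem_flatMap]
    constructor
    · rintro ⟨cd, hcd, hm⟩
      rw [List.mem_map] at hm
      obtain ⟨bp, hbp, hab⟩ := hm
      obtain ⟨hc1, hc2, hcok⟩ := (ih cd).mp hcd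
      obtain ⟨hb1, hb2, hbok⟩ := (mem_pairsN J XX (k : Int) bp).mp hbp
      injection hab with h1ab h2ab
      subst h1ab
      subst h2ab
      have hpow : 2 ^ (k + 1) = 2 * 2 ^ k := by rw [← pow_succ']
      refine ⟨by omega, by omega, ?_⟩
      intro j hj
      by_cases hjk : j < k
      · rw [show k + 1 - 1 - j = (k - 1 - j) + 1 by omega,
            bitN_double _ _ _ hb1, bitN_double _ _ _ hb2]
        exact hcok j hjk
      · have hjeq : j = k := by omega
        subst hjeq
        rw [show j + 1 - 1 - j = 0 by omega, bitN_zero', bitN_zero',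
            show (2 * cd.1 + bp.1) % 2 = bp.1 by omega,
            show (2 * cd.2 + bp.2) % 2 = bp.2 by omega]
        exact hbok
    · rintro ⟨ha, hb, hok⟩
      have hpow : 2 ^ (k + 1) = 2 * 2 ^ k := by rw [← pow_succ']
      refine ⟨(a / 2, b / 2), (ih (a / 2, b / 2)).mpr ⟨by omega, by omega, ?_⟩, ?_⟩
      · intro j hj
        have h1 : bitN (a / 2) (k - 1 - j) = bitN a (k + 1 - 1 - j) := by
          unfold bitN
          rw [Nat.div_div_eq_div_mul, ← pow_succ', show k - 1 - j + 1 = k + 1 - 1 - j by omega]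
        have h2 : bitN (b / 2) (k - 1 - j) = bitN b (k + 1 - 1 - j) := by
          unfold bitN
          rw [Nat.div_div_eq_div_mul, ← pow_succ', show k - 1 - j + 1 = k + 1 - 1 - j by omega]
        rw [h1, h2]
        exact hok j (by omega)
      · rw [List.mem_map]
        refine ⟨(a % 2, b % 2), (mem_pairsN J XX (k : Int) (a % 2, b % 2)).mpr ⟨by omega, by omega, ?_⟩, by simp [Prod.ext_iff]; omega⟩
        have := hok k (by omega)
        rw [show k + 1 - 1 - k = 0 by omega, bitN_zero', bitN_zero'] at this
        exact this

lemma nodup_prs (J XX : List Int) : ∀ k : Nat, (prs J XX k).Nodup := by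
  intro k
  induction k with
  | zero => simp [prs]
  | succ k ih =>
    rw [prs, List.nodup_flatMap]
    constructor
    · intro cd _
      apply List.Nodup.map_on ?_ (nodup_pairsN J XX (k : Int))
      intro x hx y hy hxy
      obtain ⟨hx1, hx2, _⟩ := (mem_pairsN J XX (k : Int) x).mp hx
      obtain ⟨hy1, hy2, _⟩ := (mem_pairsN J XX (k : Int) y).mp hy
      rw [Prod.ext_iff] at hxy ⊢
      simp only at hxy ⊢
      omega
    · refine List.Pairwise.imp (fun {cd cd'} hne => ?_) ih
      simp only [Function.onFun]
      intro z hz1 hz2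
      rw [List.mem_map] at hz1 hz2
      obtain ⟨x, hx, hzx⟩ := hz1
      obtain ⟨y, hy, hzy⟩ := hz2
      obtain ⟨hx1, hx2, _⟩ := (mem_pairsN J XX (k : Int) x).mp hx
      obtain ⟨hy1, hy2, _⟩ := (mem_pairsN J XX (k : Int) y).mp hy
      apply hne
      rw [← hzy] at hzx
      rw [Prod.ext_iff] at hzx ⊢
      simp only at hzx ⊢
      omega

-- one step of partB's fold, named for the proofs
def partStep (n : Int) (J XX : List Int) (part : List Int) (p : Int) : List Int :=
  let pairs : List (Int × Int) :=
    if p ∈ XX then (if p ∈ J then [(0, 1)] else [(0, 0)])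
    else if p ∈ J then [(0, 0), (0, 1), (1, 0), (1, 1)]
    else [(0, 1), (1, 0)]
  let hi : Int := 2 ^ (2 * n - 1 - p).toNat
  let lo : Int := 2 ^ (n - 1 - p).toNat
  part.flatMap (fun v => pairs.map (fun bp => v + bp.1 * hi + bp.2 * lo))

lemma partB_def (n : Int) (J XX : List Int) :
    partB n J XX = (PySem.List.pyRange 0 n 1).foldl (partStep n J XX) [0] := rfl

lemma pairsN_cast (n : Int) (J XX : List Int) (p : Int) :
    (if p ∈ XX then (if p ∈ J then [((0:Int), (1:Int))] else [(0, 0)])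
     else if p ∈ J then [(0, 0), (0, 1), (1, 0), (1, 1)]
     else [(0, 1), (1, 0)]) = (pairsN J XX p).map (fun b => ((b.1 : Int), (b.2 : Int))) := by
  unfold pairsN
  split_ifs <;> rfl

lemma partB_inv (n : Int) (J XX : List Int) (hn : 0 ≤ n) : ∀ k : Nat, (k : Int) ≤ n →
    (PySem.List.pyRange 0 (k : Int) 1).foldl (partStep n J XX) [0]
      = (prs J XX k).map (fun ab =>
          ((ab.1 * 2 ^ (2 * n.toNat - k) + ab.2 * 2 ^ (n.toNat - k) : Nat) : Int)) := by
  intro k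
  induction k with
  | zero =>
    intro _
    rw [PySem.List.pyRange_one_eq_nil (by omega)]
    simp [prs]
  | succ k ih =>
    intro hk
    have hk' : (k : Int) ≤ n := by push_cast at hk ⊢; omega
    have hkm : k < n.toNat := by omega
    rw [show ((k + 1 : Nat) : Int) = (k : Int) + 1 by push_cast; ring]
    rw [PySem.List.pyRange_one_succ_right (by omega), List.foldl_append]
    rw [ih hk']
    show partStep n J XX _ (k : Int) = _
    unfold partStep
    simp only
    rw [pairsN_cast n J XX (k : Int)]
    rw [prs, List.flatMap_map, List.map_flatMap]
    apply List.flatMap_congr  -- check name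
    intro ab hab
    rw [List.map_map, List.map_map]
    apply List.map_congr_left
    intro bp hbp
    simp only [Function.comp_apply]
    have he1 : (2 * n - 1 - (k : Int)).toNat = 2 * n.toNat - 1 - k := by omega
    have he2 : (n - 1 - (k : Int)).toNat = n.toNat - 1 - k := by omega
    rw [he1, he2]
    have hs1 : 2 * n.toNat - k = (2 * n.toNat - 1 - k) + 1 := by omega
    have hs2 : n.toNat - k = (n.toNat - 1 - k) + 1 := by omega
    rw [hs1, hs2, show n.toNat - (k + 1) = n.toNat - 1 - k by omega,
        show 2 * n.toNat - (k + 1) = 2 * n.toNat - 1 - k by omega]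
    push_cast
    rw [pow_succ', pow_succ']
    push_cast
    ring

lemma partB_eq (n : Int) (J XX : List Int) (hn : 0 ≤ n) :
    partB n J XX = (prs J XX n.toNat).map (fun ab => ((ab.1 * 2 ^ n.toNat + ab.2 : Nat) : Int)) := by
  have h := partB_inv n J XX hn n.toNat (by omega)
  rw [show ((n.toNat : Nat) : Int) = n by omega] at h
  rw [partB_def, h]
  apply List.map_congr_left
  intro ab _
  congr 1
  rw [show 2 * n.toNat - n.toNat = n.toNat by omega, Nat.sub_self, pow_zero, Nat.mul_one]

lemma enc_inj (m a b a' b' : Nat) (hb : b < 2 ^ m) (hb' : b' < 2 ^ m)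
    (h : a * 2 ^ m + b = a' * 2 ^ m + b') : a = a' ∧ b = b' := by
  have h1 : (a * 2 ^ m + b) / 2 ^ m = a := by
    rw [Nat.add_comm, Nat.add_mul_div_right _ _ (by positivity), Nat.div_eq_of_lt hb]
    omega
  have h2 : (a' * 2 ^ m + b') / 2 ^ m = a' := by
    rw [Nat.add_comm, Nat.add_mul_div_right _ _ (by positivity), Nat.div_eq_of_lt hb']
    omega
  have ha : a = a' := by rw [← h1, ← h2, h]
  constructor
  · exact ha
  · subst ha; omega

lemma nodup_partB (n : Int) (J XX : List Int) (hn : 0 ≤ n) : (partB n J XX).Nodup := by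
  rw [partB_eq n J XX hn]
  apply List.Nodup.map_on ?_ (nodup_prs J XX n.toNat)
  intro x hx y hy hxy
  obtain ⟨hx1, hx2, _⟩ := (mem_prs J XX n.toNat x).mp hx
  obtain ⟨hy1, hy2, _⟩ := (mem_prs J XX n.toNat y).mp hy
  have : x.1 * 2 ^ n.toNat + x.2 = y.1 * 2 ^ n.toNat + y.2 := by exact_mod_cast hxy
  obtain ⟨h1, h2⟩ := enc_inj n.toNat x.1 x.2 y.1 y.2 hx2 hy2 this
  exact Prod.ext h1 h2

-- bits of an encoded key: high half reads a, low half reads b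
lemma bitN_enc_high (m a b s : Nat) (hb : b < 2 ^ m) : bitN (a * 2 ^ m + b) (m + s) = bitN a s := by
  unfold bitN
  rw [pow_add, ← Nat.div_div_eq_div_mul,
      Nat.add_comm, Nat.add_mul_div_right _ _ (by positivity),
      Nat.div_eq_of_lt hb, Nat.zero_add]

lemma bitN_enc_low (m a b s : Nat) (hs : s < m) : bitN (a * 2 ^ m + b) s = bitN b s := by
  unfold bitN
  have hm : 2 ^ m = 2 ^ (m - s) * 2 ^ s := by rw [← pow_add]; congr 1; omega
  rw [hm, ← Nat.mul_assoc, Nat.add_comm, Nat.add_mul_div_right _ _ (by positivity)]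
  have h2 : a * 2 ^ (m - s) = a * 2 ^ (m - s - 1) * 2 := by
    rw [Nat.mul_assoc, ← pow_succ]
    congr 2
    omega
  rw [h2, Nat.add_mul_mod_self_right]

lemma bitN_mod_low (v m s : Nat) (hs : s < m) : bitN (v % 2 ^ m) s = bitN v s := by
  conv_rhs => rw [show v = v / 2 ^ m * 2 ^ m + v % 2 ^ m from (Nat.div_add_mod' v (2 ^ m)).symm]
  rw [bitN_enc_low m _ _ s hs]

lemma valid_mem_bounds (nn : Int) (c : List Int) : ∀ lo, ValidFrom nn lo c →
    ∀ x ∈ c, lo ≤ x ∧ x < nn := by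
  induction c with
  | nil => intro _ _ x hx; exact absurd hx (by simp)
  | cons a t ih =>
    intro lo ⟨h1, h2, h3⟩ x hx
    rcases List.mem_cons.mp hx with rfl | hxt
    · exact ⟨h1, by omega⟩
    · have := ih (a + 1) h3 x hxt
      omega

lemma valid_nodup (nn : Int) (c : List Int) : ∀ lo, ValidFrom nn lo c → c.Nodup := by
  induction c with
  | nil => intro _ _; exact List.nodup_nil
  | cons a t ih =>
    intro lo ⟨h1, h2, h3⟩
    refine List.Nodup.cons ?_ (ih (a + 1) h3)
    intro hmem
    have := valid_mem_bounds nn t (a + 1) h3 a hmem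
    omega

lemma length_filter_mem (n : Int) (XX : List Int) (hv : ValidFrom n 0 XX) :
    ((PySem.List.pyRange 0 n 1).filter (fun x => decide (x ∈ XX))).length = XX.length := by
  have hperm : ((PySem.List.pyRange 0 n 1).filter (fun x => decide (x ∈ XX))).Perm XX := by
    rw [List.perm_ext_iff_of_nodup (List.Nodup.filter _ (PySem.List.nodup_pyRange_one 0 n)) (valid_nodup n XX 0 hv)]
    intro x
    rw [List.mem_filter, PySem.List.mem_pyRange_one]
    constructor
    · rintro ⟨_, hx⟩; simpa using hx
    · intro hx
      have := valid_mem_bounds n XX 0 hv x hx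
      exact ⟨by omega, by simpa using hx⟩
  exact hperm.length_eq

lemma length_YY (n : Int) (XX : List Int) (hv : ValidFrom n 0 XX) :
    ((PySem.List.pyRange 0 n 1).filter (fun y => ¬ y ∈ XX)).length = n.toNat - XX.length := by
  have htot := List.length_eq_length_filter_add (l := PySem.List.pyRange 0 n 1) (f := fun x => decide (x ∈ XX))
  rw [PySem.List.length_pyRange_one, length_filter_mem n XX hv] at htot
  have : ((PySem.List.pyRange 0 n 1).filter (fun y => ¬ y ∈ XX)) =
      ((PySem.List.pyRange 0 n 1).filter (fun x => !(decide (x ∈ XX)))) := by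
    apply List.filter_congr
    intro x _
    simp
  rw [this]
  omega

def q1 (J : List Int) (n : Int) (B : List Int) (x : Int) : Bool :=
  if x ∈ J then decide (bGet B x = 0 ∧ bGet B (x + n) = 1)
  else decide (bGet B x = 0 ∧ bGet B (x + n) = 0)

def q2 (J : List Int) (n : Int) (B : List Int) (y : Int) : Bool :=
  if y ∈ J then true else decide (bGet B y ≠ bGet B (y + n))

lemma keyTest_eq_counts (n : Int) (J XX YY : List Int) (i : Int) :
    keyTest n J XX YY i = decide
      (((XX.countP (q1 J n (formatBits (2 * n) i)) : Nat) : Int)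
        + ((YY.countP (q2 J n (formatBits (2 * n) i)) : Nat) : Int) = n) := by
  unfold keyTest
  simp only
  rw [PySem.List.foldl_congr_mem XX _
    (fun count x => count + (if q1 J n (formatBits (2 * n) i) x then 1 else 0)) 0
    (by intro acc x _; unfold q1; split_ifs <;> simp_all)]
  rw [PySem.List.foldl_add]
  rw [PySem.List.sum_map_ite_one_zero]
  rw [PySem.List.foldl_congr_mem YY _
    (fun count y => count + (if q2 J n (formatBits (2 * n) i) y then 1 else 0)) _
    (by intro acc y _; unfold q2; split_ifs <;> simp_all)]
  rw [PySem.List.foldl_add]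
  rw [PySem.List.sum_map_ite_one_zero]
  rw [decide_eq_decide]
  omega

lemma q1_pairOK (J XX : List Int) (n x : Int) (B : List Int) (b1 b2 : Nat)
    (hb1 : b1 < 2) (hb2 : b2 < 2) (hx : x ∈ XX)
    (hB1 : bGet B x = (b1 : Int)) (hB2 : bGet B (x + n) = (b2 : Int)) :
    q1 J n B x = pairOKb J XX x b1 b2 := by
  unfold q1 pairOKb
  rw [if_pos hx, hB1, hB2]
  by_cases hj : x ∈ J <;> simp [hj] <;> interval_cases b1 <;> interval_cases b2 <;> simp

lemma q2_pairOK (J XX : List Int) (n y : Int) (B : List Int) (b1 b2 : Nat)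
    (hb1 : b1 < 2) (hb2 : b2 < 2) (hy : ¬ y ∈ XX)
    (hB1 : bGet B y = (b1 : Int)) (hB2 : bGet B (y + n) = (b2 : Int)) :
    q2 J n B y = pairOKb J XX y b1 b2 := by
  unfold q2 pairOKb
  rw [if_neg hy, hB1, hB2]
  by_cases hj : y ∈ J <;> simp [hj] <;> interval_cases b1 <;> interval_cases b2 <;> simp

lemma bitN_lt_two (v s : Nat) : bitN v s < 2 := by
  unfold bitN
  omega

lemma keyTest_char (n : Int) (hn : 0 ≤ n) (J XX : List Int) (hv : ValidFrom n 0 XX) (i : Int)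
    (h0 : 0 ≤ i) (h1 : i < 2 ^ (2 * n.toNat)) :
    (keyTest n J XX ((PySem.List.pyRange 0 n 1).filter (fun y => ¬ y ∈ XX)) i = true) ↔
      (∀ j : Nat, j < n.toNat →
        pairOKb J XX (j : Int) (bitN i.toNat (2 * n.toNat - 1 - j)) (bitN i.toNat (n.toNat - 1 - j)) = true) := by
  by_cases hm : n.toNat = 0
  · -- n = 0 : XX = [], YY = [], count = 0 = n
    have hXX : XX = [] := by
      cases XX with
      | nil => rfl
      | cons a t =>
        obtain ⟨ha1, ha2, _⟩ := hv
        exfalso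
        have := t.length
        omega
    subst hXX
    have hn0 : n = 0 := by omega
    subst hn0
    rw [keyTest_eq_counts]
    rw [PySem.List.pyRange_one_eq_nil (by omega)]
    simp
  · -- n ≥ 1
    have hfmt : formatBits (2 * n) i = bitsList (2 * n.toNat) i.toNat := by
      rw [show 2 * n = ((2 * n.toNat : Nat) : Int) by omega,
          show i = ((i.toNat : Nat) : Int) by omega]
      refine fmt_eq (2 * n.toNat) i.toNat (by omega) ?_
      have hpow : ((2 : Int) ^ (2 * n.toNat)) = ((2 ^ (2 * n.toNat) : Nat) : Int) := by
        push_cast; ring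
      omega
    have hbits : ∀ x : Int, 0 ≤ x → x < n →
        bGet (formatBits (2 * n) i) x = ((bitN i.toNat (2 * n.toNat - 1 - x.toNat) : Nat) : Int) ∧
        bGet (formatBits (2 * n) i) (x + n) = ((bitN i.toNat (n.toNat - 1 - x.toNat) : Nat) : Int) := by
      intro x hx0 hxn
      rw [hfmt]
      constructor
      · rw [show x = ((x.toNat : Nat) : Int) by omega]
        exact bGet_bits (2 * n.toNat) i.toNat x.toNat (by omega)
      · rw [show x + n = (((x.toNat + n.toNat : Nat) : Nat) : Int) by omega]
        rw [bGet_bits (2 * n.toNat) i.toNat (x.toNat + n.toNat) (by omega)]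
        congr 2
        omega
    rw [keyTest_eq_counts]
    set YY := (PySem.List.pyRange 0 n 1).filter (fun y => ¬ y ∈ XX) with hYYdef
    have hlY : YY.length = n.toNat - XX.length := length_YY n XX hv
    have hlX : XX.length ≤ n.toNat := by
      have := length_filter_mem n XX hv
      have h2 := List.length_filter_le (fun x => decide (x ∈ XX)) (PySem.List.pyRange 0 n 1)
      rw [this, PySem.List.length_pyRange_one] at h2
      omega
    rw [decide_eq_true_iff]
    have hc1 : XX.countP (q1 J n (formatBits (2 * n) i)) ≤ XX.length := List.countP_le_length
    have hc2 : YY.countP (q2 J n (formatBits (2 * n) i)) ≤ YY.length := List.countP_le_length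
    constructor
    · intro hsum j hj
      have hfull1 : XX.countP (q1 J n (formatBits (2 * n) i)) = XX.length := by omega
      have hfull2 : YY.countP (q2 J n (formatBits (2 * n) i)) = YY.length := by omega
      have hall1 := List.countP_eq_length.mp hfull1
      have hall2 := List.countP_eq_length.mp hfull2
      by_cases hjX : ((j : Nat) : Int) ∈ XX
      · have hb := hbits (j : Int) (by omega) (by omega)
        rw [show ((j : Nat) : Int).toNat = j by omega] at hb
        rw [← q1_pairOK J XX n (j : Int) (formatBits (2 * n) i) _ _
          (bitN_lt_two _ _) (bitN_lt_two _ _) hjX hb.1 hb.2]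
        exact hall1 _ hjX
      · have hjY : ((j : Nat) : Int) ∈ YY := by
          rw [hYYdef, List.mem_filter, PySem.List.mem_pyRange_one]
          refine ⟨⟨by omega, by omega⟩, by simpa using hjX⟩
        have hb := hbits (j : Int) (by omega) (by omega)
        rw [show ((j : Nat) : Int).toNat = j by omega] at hb
        rw [← q2_pairOK J XX n (j : Int) (formatBits (2 * n) i) _ _
          (bitN_lt_two _ _) (bitN_lt_two _ _) hjX hb.1 hb.2]
        exact hall2 _ hjY
    · intro hall
      have hfull1 : XX.countP (q1 J n (formatBits (2 * n) i)) = XX.length := by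
        apply List.countP_eq_length.mpr
        intro x hx
        have hbd := valid_mem_bounds n XX 0 hv x hx
        have hb := hbits x hbd.1 hbd.2
        rw [q1_pairOK J XX n x (formatBits (2 * n) i) _ _
          (bitN_lt_two _ _) (bitN_lt_two _ _) hx hb.1 hb.2]
        have := hall x.toNat (by omega)
        rw [show ((x.toNat : Nat) : Int) = x by omega] at this
        exact this
      have hfull2 : YY.countP (q2 J n (formatBits (2 * n) i)) = YY.length := by
        apply List.countP_eq_length.mpr
        intro y hy
        rw [hYYdef, List.mem_filter, PySem.List.mem_pyRange_one] at hy
        obtain ⟨⟨hy0, hyn⟩, hyX⟩ := hy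
        have hyX' : ¬ y ∈ XX := by simpa using hyX
        have hb := hbits y hy0 hyn
        rw [q2_pairOK J XX n y (formatBits (2 * n) i) _ _
          (bitN_lt_two _ _) (bitN_lt_two _ _) hyX' hb.1 hb.2]
        have := hall y.toNat (by omega)
        rw [show ((y.toNat : Nat) : Int) = y by omega] at this
        exact this
      omega

lemma mem_partB_iff (n : Int) (J XX : List Int) (hn : 0 ≤ n) (v : Int) :
    v ∈ partB n J XX ↔ (0 ≤ v ∧ v < 2 ^ (2 * n.toNat) ∧
      ∀ j : Nat, j < n.toNat →
        pairOKb J XX (j : Int) (bitN v.toNat (2 * n.toNat - 1 - j)) (bitN v.toNat (n.toNat - 1 - j)) = true) := by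
  have hP : 0 < 2 ^ n.toNat := by positivity
  have hpow2 : (2 : Nat) ^ (2 * n.toNat) = 2 ^ n.toNat * 2 ^ n.toNat := by
    rw [← pow_add]; congr 1; omega
  have hpowI : ((2 : Int) ^ (2 * n.toNat)) = ((2 ^ (2 * n.toNat) : Nat) : Int) := by
    push_cast; ring
  rw [partB_eq n J XX hn, List.mem_map]
  constructor
  · rintro ⟨ab, hab, rfl⟩
    obtain ⟨ha, hb, hok⟩ := (mem_prs J XX n.toNat ab).mp hab
    have hlt : ab.1 * 2 ^ n.toNat + ab.2 < 2 ^ (2 * n.toNat) := by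
      rw [hpow2]
      calc ab.1 * 2 ^ n.toNat + ab.2 < ab.1 * 2 ^ n.toNat + 2 ^ n.toNat := by omega
        _ = (ab.1 + 1) * 2 ^ n.toNat := by ring
        _ ≤ 2 ^ n.toNat * 2 ^ n.toNat := Nat.mul_le_mul_right _ (by omega)
    refine ⟨by positivity, by rw [hpowI]; exact_mod_cast hlt, ?_⟩
    intro j hj
    have htn : ((ab.1 * 2 ^ n.toNat + ab.2 : Nat) : Int).toNat = ab.1 * 2 ^ n.toNat + ab.2 := by omega
    rw [htn]
    rw [show 2 * n.toNat - 1 - j = n.toNat + (n.toNat - 1 - j) by omega,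
        bitN_enc_high n.toNat ab.1 ab.2 _ hb,
        bitN_enc_low n.toNat ab.1 ab.2 _ (by omega)]
    exact hok j hj
  · rintro ⟨h0, hlt, hok⟩
    have hltN : v.toNat < 2 ^ (2 * n.toNat) := by
      rw [hpowI] at hlt; omega
    refine ⟨(v.toNat / 2 ^ n.toNat, v.toNat % 2 ^ n.toNat), ?_, ?_⟩
    · apply (mem_prs J XX n.toNat _).mpr
      refine ⟨by rw [Nat.div_lt_iff_lt_mul hP, ← hpow2]; exact hltN, by omega, ?_⟩
      intro j hj
      simp only
      have hhi : bitN (v.toNat / 2 ^ n.toNat) (n.toNat - 1 - j) = bitN v.toNat (2 * n.toNat - 1 - j) := by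
        unfold bitN
        rw [Nat.div_div_eq_div_mul, ← pow_add, show n.toNat + (n.toNat - 1 - j) = 2 * n.toNat - 1 - j by omega]
      have hlo : bitN (v.toNat % 2 ^ n.toNat) (n.toNat - 1 - j) = bitN v.toNat (n.toNat - 1 - j) :=
        bitN_mod_low v.toNat n.toNat _ (by omega)
      rw [hhi, hlo]
      exact hok j hj
    · simp only
      rw [Nat.div_add_mod' v.toNat (2 ^ n.toNat)]
      omega

lemma block_eq (n : Int) (J XX : List Int) (hn : 0 ≤ n) (hv : ValidFrom n 0 XX) :
    (PySem.List.pyRange 0 ((2 : Int) ^ (2 * n).toNat) 1).filter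
      (fun i => keyTest n J XX ((PySem.List.pyRange 0 n 1).filter (fun y => ¬ y ∈ XX)) i)
    = PySem.List.sorted (partB n J XX) (fun v => v) false := by
  have hexp : (2 * n).toNat = 2 * n.toNat := by omega
  apply Eq.symm
  apply PySem.List.sorted_eq_of_perm_of_pairwise_lt
  · rw [List.perm_ext_iff_of_nodup
      (List.Nodup.filter _ (PySem.List.nodup_pyRange_one _ _)) (nodup_partB n J XX hn)]
    intro v
    rw [List.mem_filter, PySem.List.mem_pyRange_one, mem_partB_iff n J XX hn v]
    constructor
    · rintro ⟨⟨hv0, hvlt⟩, ht⟩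
      rw [hexp] at hvlt
      exact ⟨hv0, hvlt, (keyTest_char n hn J XX hv v hv0 hvlt).mp ht⟩
    · rintro ⟨hv0, hvlt, hok⟩
      rw [hexp]
      exact ⟨⟨hv0, hvlt⟩, (keyTest_char n hn J XX hv v hv0 hvlt).mpr hok⟩
  · exact List.Pairwise.sublist List.filter_sublist (PySem.List.pairwise_lt_pyRange_one _ _)

theorem main_eq (n : Int) (J : List Int) (d : Int) (hPre : 0 ≤ n ∨ 0 < d) :
    count_keys_sWK_small n J d = count_keys_sWK_small_alt n J d := by
  unfold count_keys_sWK_small count_keys_sWK_small_alt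
  simp only
  rw [combsA_eq n d hPre]
  apply PySem.List.foldl_congr_mem
  intro acc XX hXX
  rw [combosRec_eq_sfx n (n - 0).toNat 0 d rfl] at hXX
  have hn : 0 ≤ n := by
    by_contra hneg
    have hd : 0 < d := by rcases hPre with h | h <;> omega
    rw [sfx_nil n d.toNat 0 (by omega) (by omega)] at hXX
    exact absurd hXX (by simp)
  have hv := (mem_sfx n d.toNat 0 XX hXX).1
  rw [PySem.List.foldl_append_if_eq_filter]
  rw [block_eq n J XX hn hv]

-- ===== VERDICT (by name: the statement is the Claim_ definition above) =====
theorem count_keys_sWK_small_spec : Claim_equal_count_keys_sWK_small := by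
  intro n J d _ hPre
  unfold Pre_count_keys_sWK_small at hPre
  unfold Spec_count_keys_sWK_small
  exact main_eq n J d hPre
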